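-- pv_equiv track=rewrite | github.com/ericgarig/daily-coding-problem | 209-longest-substring-of-3-stirngs.py | longest_subsequence_order_a
-- ===== SOURCE A (Python) =====
-- def longest_subsequence_order_a(a, b, c):
--     """Find the longest subsequence based on the order of a."""
--     result = []
--     for i in range(len(a)):
--         if a[i] in b and a[i] in c:
--             result.append(a[i])
--             b = b[b.index(a[i]) + 1 :]
--             c = c[c.index(a[i]) + 1 :]
--     return len(result)
-- ===== SOURCE B (Python) =====
-- def _bisect_left(lst, x):
--     """Hand-written bisect_left (A imports no modules, so no bisect import)."""
--     lo, hi = 0, len(lst)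
--     while lo < hi:
--         mid = (lo + hi) // 2
--         if lst[mid] < x:
--             lo = mid + 1
--         else:
--             hi = mid
--     return lo
--
--
-- def longest_subsequence_order_a(a, b, c):
--     """Find the longest subsequence based on the order of a."""
--     posb = {}
--     for i, ch in enumerate(b):
--         posb.setdefault(ch, []).append(i)
--     posc = {}
--     for i, ch in enumerate(c):
--         posc.setdefault(ch, []).append(i)
--     count = pb = pc = 0
--     for ch in a:
--         lb = posb.get(ch, [])
--         lc = posc.get(ch, [])
--         j = _bisect_left(lb, pb)
--         k = _bisect_left(lc, pc)
--         if j < len(lb) and k < len(lc):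
--             count += 1
--             pb = lb[j] + 1
--             pc = lc[k] + 1
--     return count
-- ===== Notes on version B (the rewrite author's own statement) =====
-- stated objective: faster
-- what changed: B precomputes a dict of sorted per-character position lists for b and c in one pass each, then for every character of a binary-searches (hand-written bisect_left) the first position at or after the current pointer, instead of A's repeated linear membership scans plus slice copies of b and c.
import Mathlib
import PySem

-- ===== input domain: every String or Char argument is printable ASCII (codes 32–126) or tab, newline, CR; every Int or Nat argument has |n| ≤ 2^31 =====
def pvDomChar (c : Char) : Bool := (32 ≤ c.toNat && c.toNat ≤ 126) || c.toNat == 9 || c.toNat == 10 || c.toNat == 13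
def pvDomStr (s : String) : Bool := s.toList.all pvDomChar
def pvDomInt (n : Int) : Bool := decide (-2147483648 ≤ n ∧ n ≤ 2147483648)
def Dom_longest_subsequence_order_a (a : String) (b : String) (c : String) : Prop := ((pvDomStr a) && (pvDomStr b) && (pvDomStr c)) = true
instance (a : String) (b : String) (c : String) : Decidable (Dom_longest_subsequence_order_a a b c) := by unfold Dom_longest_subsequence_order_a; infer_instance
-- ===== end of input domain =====

-- B precomputes per-character position lists for b and c and binary-searches the first position at
-- or after the current pointer, replacing A's repeated membership scan + slice copying; return
-- values proved equal on all inputs.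

-- ===== PORT A =====
-- state = (result, current b suffix, current c suffix); `x in s` = Chars.isIn, `s.index(x)` = Chars.find
-- (guarded by the membership test, where Python's .index equals .find), `s[i+1:]` = List.slice.
def pvStepA (st : List Char × List Char × List Char) (ch : Char) : List Char × List Char × List Char :=
  let (res, b, c) := st
  if PySem.Chars.isIn [ch] b && PySem.Chars.isIn [ch] c then
    (res ++ [ch],
     PySem.List.slice b (some (PySem.Chars.find b [ch] + 1)) none,
     PySem.List.slice c (some (PySem.Chars.find c [ch] + 1)) none)
  else st

def longest_subsequence_order_a (a : String) (b : String) (c : String) : Int :=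
  ((a.toList.foldl pvStepA ([], b.toList, c.toList)).1.length : Int)

-- ===== PORT B =====
-- 'for i, ch in enumerate(s): pos.setdefault(ch, []).append(i)' = Dict.modify ch [] (· ++ [i]).
def pvPositions (s : List Char) : PySem.Dict Char (List Int) :=
  (PySem.List.enumerate s 0).foldl (fun d p => d.modify p.2 [] (· ++ [p.1])) PySem.Dict.empty

-- state = (count, pointer into b, pointer into c); Source B's hand-written _bisect_left is exactly
-- bisect_left's lo/hi/mid loop = PySem.List.bisectLeft; 'lb[j]' is in range when j < len(lb).
def pvStepB (db dc : PySem.Dict Char (List Int)) (st : Int × Int × Int) (ch : Char) : Int × Int × Int :=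
  let (cnt, pb, pc) := st
  let lb := db.getD ch []
  let lc := dc.getD ch []
  let j := PySem.List.bisectLeft lb pb
  let k := PySem.List.bisectLeft lc pc
  if j < lb.length ∧ k < lc.length then (cnt + 1, lb.getD j 0 + 1, lc.getD k 0 + 1) else st

def longest_subsequence_order_a_alt (a : String) (b : String) (c : String) : Int :=
  (a.toList.foldl (pvStepB (pvPositions b.toList) (pvPositions c.toList)) (0, 0, 0)).1

-- ===== PRECONDITION & SPEC =====
def Spec_longest_subsequence_order_a (a : String) (b : String) (c : String) (out : Int) : Prop := out = longest_subsequence_order_a_alt a b c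
instance (a : String) (b : String) (c : String) (out : Int) : Decidable (Spec_longest_subsequence_order_a a b c out) := by unfold Spec_longest_subsequence_order_a; infer_instance

-- ===== CLAIM (what is proved, stated in full; the proofs are below) =====
def Claim_equal_longest_subsequence_order_a : Prop := ∀ (a : String) (b : String) (c : String), Dom_longest_subsequence_order_a a b c → Spec_longest_subsequence_order_a a b c (longest_subsequence_order_a a b c)

-- ===== LEMMAS AND PROOFS =====

-- the per-character occurrence positions of ch in s, in increasing order
def pvOcc (s : List Char) (ch : Char) : List Int :=
  ((PySem.List.enumerate s 0).filter (fun p => p.2 == ch)).map (·.1)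

lemma pv_positions_getD (s : List Char) (ch : Char) :
    (pvPositions s).getD ch [] = pvOcc s ch := by
  unfold pvPositions pvOcc
  have hswap : ((PySem.List.enumerate s 0).map Prod.swap).foldl
        (fun d q => d.modify q.1 [] (· ++ [q.2])) PySem.Dict.empty
      = (PySem.List.enumerate s 0).foldl (fun d p => d.modify p.2 [] (· ++ [p.1])) PySem.Dict.empty := by
    rw [List.foldl_map]
    simp [Prod.fst_swap, Prod.snd_swap]
  rw [← hswap, PySem.Dict.getD_foldl_modify_append]
  simp [List.filter_map, List.map_map, Function.comp_def, Prod.swap]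

lemma pv_occ_mem (s : List Char) (ch : Char) (i : Int) :
    i ∈ pvOcc s ch ↔ ∃ k : Nat, ∃ h : k < s.length, s[k] = ch ∧ i = (k : Int) := by
  simp only [pvOcc, List.mem_map, List.mem_filter, PySem.List.mem_enumerate_iff]
  constructor
  · rintro ⟨p, ⟨⟨k, hk, rfl⟩, hch⟩, rfl⟩
    exact ⟨k, hk, by simpa using hch, by simp⟩
  · rintro ⟨k, hk, hch, rfl⟩
    exact ⟨(k, s[k]), ⟨⟨k, hk, by simp⟩, by simpa using hch⟩, rfl⟩

lemma pv_occ_pairwise (s : List Char) (ch : Char) : (pvOcc s ch).Pairwise (· < ·) := by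
  unfold pvOcc
  exact (List.pairwise_map).mpr ((PySem.List.pairwise_lt_enumerate s 0).filter _)

-- single-char find: a hit means the character is strictly inside the list
lemma pv_find_lt_length (s : List Char) (ch : Char) (h : PySem.Chars.find s [ch] ≠ -1) :
    (PySem.Chars.find s [ch]).toNat < s.length := by
  have h0 : 0 ≤ PySem.Chars.find s [ch] := by
    have := PySem.Chars.neg_one_le_find s [ch]; omega
  have hspec := PySem.Chars.find_spec (s := s) (sub := [ch]) h0
  have hpre : [ch] <+: s.drop (PySem.Chars.find s [ch]).toNat := hspec.1
  have : s.drop (PySem.Chars.find s [ch]).toNat ≠ [] := by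
    intro he; rw [he] at hpre; simpa using hpre.length_le
  have := List.drop_eq_nil_iff.not.mp (by simpa using this)
  omega

-- membership in a dropped suffix, stated by absolute index
lemma pv_mem_drop (s : List Char) (p : Nat) (ch : Char) :
    ch ∈ s.drop p ↔ ∃ k : Nat, ∃ h : k < s.length, p ≤ k ∧ s[k] = ch := by
  rw [List.mem_iff_getElem]
  constructor
  · rintro ⟨i, hi, hch⟩
    have hlen : p + i < s.length := by simp at hi; omega
    exact ⟨p + i, hlen, by omega, by rw [← List.getElem_drop]; exact hch⟩
  · rintro ⟨k, hk, hpk, hch⟩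
    refine ⟨k - p, by simp; omega, ?_⟩
    rw [List.getElem_drop]
    simp only [show p + (k - p) = k from by omega]
    exact hch

-- no occurrence of ch at or after position p  ↔  find on the dropped suffix misses
lemma pv_find_drop_neg (s : List Char) (ch : Char) (p : Nat) :
    PySem.Chars.find (s.drop p) [ch] = -1 ↔ ∀ k : Nat, ∀ h : k < s.length, p ≤ k → s[k] ≠ ch := by
  rw [PySem.Chars.find_eq_neg_one_iff, List.singleton_infix_iff, pv_mem_drop]
  constructor
  · intro hni k hk hpk hch; exact hni ⟨k, hk, hpk, hch⟩
  · rintro hall ⟨k, hk, hpk, hch⟩; exact hall k hk hpk hch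

-- a hit of find on the dropped suffix: position, bound, minimality
lemma pv_find_drop_pos (s : List Char) (ch : Char) (p : Nat)
    (h : PySem.Chars.find (s.drop p) [ch] ≠ -1) :
    0 ≤ PySem.Chars.find (s.drop p) [ch] ∧
    ∃ hlen : p + (PySem.Chars.find (s.drop p) [ch]).toNat < s.length,
      s[p + (PySem.Chars.find (s.drop p) [ch]).toNat] = ch ∧
      ∀ k : Nat, ∀ hk : k < s.length, p ≤ k → k < p + (PySem.Chars.find (s.drop p) [ch]).toNat → s[k] ≠ ch := by
  set f := PySem.Chars.find (s.drop p) [ch] with hf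
  have h0 : 0 ≤ f := by have := PySem.Chars.neg_one_le_find (s.drop p) [ch]; omega
  have hspec := PySem.Chars.find_spec (s := s.drop p) (sub := [ch]) h0
  have hflt : f.toNat < (s.drop p).length := pv_find_lt_length _ _ h
  have hlen : p + f.toNat < s.length := by
    rw [List.length_drop] at hflt; omega
  refine ⟨h0, hlen, ?_, ?_⟩
  · have hpre : [ch] <+: (s.drop p).drop f.toNat := hspec.1
    rw [List.drop_drop, List.drop_eq_getElem_cons hlen] at hpre
    obtain ⟨t, ht⟩ := hpre
    exact ((List.cons.injEq _ _ _ _).mp ht.symm).1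
  · intro k hk hpk hkf hch
    apply hspec.2 (k - p) (by omega)
    rw [List.drop_drop, show p + (k - p) = k from by omega,
      List.drop_eq_getElem_cons hk, hch]
    exact ⟨s.drop (k + 1), rfl⟩

-- bisect_left on the occurrence list vs find on the dropped suffix
lemma pv_bisect_occ (s : List Char) (ch : Char) (p : Nat) :
    (PySem.Chars.find (s.drop p) [ch] = -1 →
      ¬ PySem.List.bisectLeft (pvOcc s ch) (p : Int) < (pvOcc s ch).length) ∧
    (PySem.Chars.find (s.drop p) [ch] ≠ -1 →
      PySem.List.bisectLeft (pvOcc s ch) (p : Int) < (pvOcc s ch).length ∧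
      (pvOcc s ch).getD (PySem.List.bisectLeft (pvOcc s ch) (p : Int)) 0
        = (p : Int) + PySem.Chars.find (s.drop p) [ch]) := by
  set L := pvOcc s ch with hL
  set j := PySem.List.bisectLeft L (p : Int) with hj
  have hsorted : L.Pairwise (· ≤ ·) := (pv_occ_pairwise s ch).imp le_of_lt
  have hspec := PySem.List.bisectLeft_spec L (p : Int) hsorted
  constructor
  · intro hneg hjlt
    have hge : (p : Int) ≤ L[j] := hspec.2.2 j hjlt le_rfl
    have hmem : L[j] ∈ L := List.getElem_mem hjlt
    obtain ⟨k, hk, hch, hke⟩ := (pv_occ_mem s ch _).mp hmem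
    have : p ≤ k := by omega
    exact (pv_find_drop_neg s ch p).mp hneg k hk this hch
  · intro hpos
    obtain ⟨h0, hlen, hocc, hmin⟩ := pv_find_drop_pos s ch p hpos
    set f := PySem.Chars.find (s.drop p) [ch] with hfd
    set m := p + f.toNat with hm
    have hmL : (m : Int) ∈ L := (pv_occ_mem s ch _).mpr ⟨m, hlen, hocc, rfl⟩
    obtain ⟨idx, hidx, hidxe⟩ := List.getElem_of_mem hmL
    have hjidx : j ≤ idx := by
      by_contra hlt
      have := hspec.2.1 idx hidx (by omega)
      rw [hidxe] at this
      omega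
    have hjlt : j < L.length := lt_of_le_of_lt hjidx hidx
    have hgep : (p : Int) ≤ L[j] := hspec.2.2 j hjlt le_rfl
    -- L[j] is an occurrence at or after p, hence at or after m by minimality
    obtain ⟨k, hk, hch, hke⟩ := (pv_occ_mem s ch _).mp (List.getElem_mem hjlt)
    have hpk : p ≤ k := by omega
    have hmk : m ≤ k := by
      by_contra hlt
      exact hmin k hk hpk (by omega) hch
    -- and at most m since L is sorted and L[idx] = m with j ≤ idx
    have hle : L[j] ≤ (m : Int) := by
      rcases Nat.lt_or_ge j idx with hlt | hge
      · have := (List.pairwise_iff_getElem.mp (pv_occ_pairwise s ch)) j idx hjlt hidx hlt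
        rw [hidxe] at this
        exact le_of_lt this
      · have hje : j = idx := Nat.le_antisymm hjidx hge
        have h2 : L[j]? = L[idx]? := by rw [hje]
        rw [List.getElem?_eq_getElem hjlt, List.getElem?_eq_getElem hidx] at h2
        rw [Option.some.injEq] at h2
        rw [h2, hidxe]
    have : L[j] = (m : Int) := by omega
    refine ⟨hjlt, ?_⟩
    rw [List.getD_eq_getElem L 0 hjlt, this, hm]
    push_cast
    omega

-- the loop invariant: A's foldl on the dropped suffixes and B's bisect foldl grow in lock-step
lemma pv_loop (bl cl : List Char) (as : List Char) : ∀ (res : List Char) (cnt : Int) (pb pc : Nat),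
    pb ≤ bl.length → pc ≤ cl.length →
    ((as.foldl pvStepA (res, bl.drop pb, cl.drop pc)).1.length : Int) + cnt
      = (as.foldl (pvStepB (pvPositions bl) (pvPositions cl)) (cnt, (pb : Int), (pc : Int))).1 + res.length := by
  induction as with
  | nil => intro res cnt pb pc _ _; simp; omega
  | cons ch as ih =>
    intro res cnt pb pc hpb hpc
    have hOb := pv_positions_getD bl ch
    have hOc := pv_positions_getD cl ch
    have hBb := pv_bisect_occ bl ch pb
    have hBc := pv_bisect_occ cl ch pc
    by_cases hb : PySem.Chars.find (bl.drop pb) [ch] = -1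
    · -- miss in b: both loops keep their state
      have hAguard : PySem.Chars.isIn [ch] (bl.drop pb) = false := by
        rw [PySem.Chars.isIn_eq_false_iff]
        exact (PySem.Chars.find_eq_neg_one_iff _ _).mp hb
      have hBguard : ¬ (PySem.List.bisectLeft ((pvPositions bl).getD ch []) (pb : Int)
            < ((pvPositions bl).getD ch []).length ∧
          PySem.List.bisectLeft ((pvPositions cl).getD ch []) (pc : Int)
            < ((pvPositions cl).getD ch []).length) := by
        rw [hOb]
        intro hcon
        exact hBb.1 hb hcon.1
      simp only [List.foldl_cons, pvStepA, pvStepB, hAguard, Bool.false_and,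
        Bool.false_eq_true, if_false, hBguard]
      exact ih res cnt pb pc hpb hpc
    · by_cases hc : PySem.Chars.find (cl.drop pc) [ch] = -1
      · -- miss in c
        have hAguard : PySem.Chars.isIn [ch] (cl.drop pc) = false := by
          rw [PySem.Chars.isIn_eq_false_iff]
          exact (PySem.Chars.find_eq_neg_one_iff _ _).mp hc
        have hBguard : ¬ (PySem.List.bisectLeft ((pvPositions bl).getD ch []) (pb : Int)
              < ((pvPositions bl).getD ch []).length ∧
            PySem.List.bisectLeft ((pvPositions cl).getD ch []) (pc : Int)
              < ((pvPositions cl).getD ch []).length) := by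
          rw [hOc]
          intro hcon
          exact hBc.1 hc hcon.2
        simp only [List.foldl_cons, pvStepA, pvStepB, hAguard, Bool.and_false,
          Bool.false_eq_true, if_false, hBguard]
        exact ih res cnt pb pc hpb hpc
      · -- hit in both
        have hfb0 : 0 ≤ PySem.Chars.find (bl.drop pb) [ch] := by
          have := PySem.Chars.neg_one_le_find (bl.drop pb) [ch]; omega
        have hfc0 : 0 ≤ PySem.Chars.find (cl.drop pc) [ch] := by
          have := PySem.Chars.neg_one_le_find (cl.drop pc) [ch]; omega
        have hfbL : (PySem.Chars.find (bl.drop pb) [ch]).toNat < (bl.drop pb).length :=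
          pv_find_lt_length _ _ hb
        have hfcL : (PySem.Chars.find (cl.drop pc) [ch]).toNat < (cl.drop pc).length :=
          pv_find_lt_length _ _ hc
        have hAb : PySem.Chars.isIn [ch] (bl.drop pb) = true := by
          rw [PySem.Chars.isIn_iff_infix]
          exact (PySem.Chars.find_ne_neg_one_iff _ _).mp hb
        have hAc : PySem.Chars.isIn [ch] (cl.drop pc) = true := by
          rw [PySem.Chars.isIn_iff_infix]
          exact (PySem.Chars.find_ne_neg_one_iff _ _).mp hc
        obtain ⟨hjb, hvb⟩ := hBb.2 hb
        obtain ⟨hjc, hvc⟩ := hBc.2 hc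
        have hBguard : (PySem.List.bisectLeft ((pvPositions bl).getD ch []) (pb : Int)
              < ((pvPositions bl).getD ch []).length ∧
            PySem.List.bisectLeft ((pvPositions cl).getD ch []) (pc : Int)
              < ((pvPositions cl).getD ch []).length) := by
          rw [hOb, hOc]; exact ⟨hjb, hjc⟩
        have hsliceb : PySem.List.slice (bl.drop pb) (some (PySem.Chars.find (bl.drop pb) [ch] + 1)) none
            = bl.drop (pb + (PySem.Chars.find (bl.drop pb) [ch]).toNat + 1) := by
          rw [PySem.List.slice_from (bl.drop pb) (by omega), List.drop_drop]
          congr 1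
          omega
        have hslicec : PySem.List.slice (cl.drop pc) (some (PySem.Chars.find (cl.drop pc) [ch] + 1)) none
            = cl.drop (pc + (PySem.Chars.find (cl.drop pc) [ch]).toNat + 1) := by
          rw [PySem.List.slice_from (cl.drop pc) (by omega), List.drop_drop]
          congr 1
          omega
        have hvb' : ((pvPositions bl).getD ch []).getD
              (PySem.List.bisectLeft ((pvPositions bl).getD ch []) (pb : Int)) 0 + 1
            = ((pb + (PySem.Chars.find (bl.drop pb) [ch]).toNat + 1 : Nat) : Int) := by
          rw [hOb, hvb]; push_cast; omega
        have hvc' : ((pvPositions cl).getD ch []).getD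
              (PySem.List.bisectLeft ((pvPositions cl).getD ch []) (pc : Int)) 0 + 1
            = ((pc + (PySem.Chars.find (cl.drop pc) [ch]).toNat + 1 : Nat) : Int) := by
          rw [hOc, hvc]; push_cast; omega
        simp only [List.foldl_cons, pvStepA, pvStepB, hAb, hAc, Bool.and_self, if_true,
          if_pos hBguard, hsliceb, hslicec, hvb', hvc']
        have hpb' : pb + (PySem.Chars.find (bl.drop pb) [ch]).toNat + 1 ≤ bl.length := by
          have := List.length_drop (l := bl) (i := pb); omega
        have hpc' : pc + (PySem.Chars.find (cl.drop pc) [ch]).toNat + 1 ≤ cl.length := by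
          have := List.length_drop (l := cl) (i := pc); omega
        have hIH := ih (res ++ [ch]) (cnt + 1)
          (pb + (PySem.Chars.find (bl.drop pb) [ch]).toNat + 1)
          (pc + (PySem.Chars.find (cl.drop pc) [ch]).toNat + 1) hpb' hpc'
        simp only [List.length_append, List.length_singleton] at hIH ⊢
        push_cast at hIH ⊢
        omega

-- ===== VERDICT (by name: the statement is the Claim_ definition above) =====
theorem longest_subsequence_order_a_spec : Claim_equal_longest_subsequence_order_a := by
  intro a b c _
  unfold Spec_longest_subsequence_order_a longest_subsequence_order_a longest_subsequence_order_a_alt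
  have := pv_loop b.toList c.toList a.toList [] 0 0 0 (Nat.zero_le _) (Nat.zero_le _)
  simpa using this
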